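-- pv_equiv track=rewrite | github.com/liam-gb/taro | training/data/batches_expanded/responses/generate_batch_0025.py | get_card_element
-- ===== SOURCE A (Python) =====
-- def get_card_element(card_name):
--     """Determine the elemental association of a card."""
--     name_lower = card_name.lower()
--     if 'wands' in name_lower:
--         return 'fire'
--     elif 'cups' in name_lower:
--         return 'water'
--     elif 'swords' in name_lower:
--         return 'air'
--     elif 'pentacles' in name_lower:
--         return 'earth'
--     else:
--         # Major Arcana associations
--         fire_majors = ['emperor', 'strength', 'wheel', 'tower', 'sun', 'judgement']
--         water_majors = ['high priestess', 'empress', 'chariot', 'hanged', 'death', 'moon', 'star']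
--         air_majors = ['fool', 'magician', 'lovers', 'justice', 'temperance', 'world']
--         earth_majors = ['hierophant', 'hermit', 'devil']
--
--         for major in fire_majors:
--             if major in name_lower:
--                 return 'fire'
--         for major in water_majors:
--             if major in name_lower:
--                 return 'water'
--         for major in air_majors:
--             if major in name_lower:
--                 return 'air'
--         for major in earth_majors:
--             if major in name_lower:
--                 return 'earth'
--     return 'spirit'
-- ===== SOURCE B (Python) =====
-- # B: instead of testing each keyword for substring containment, enumerate the
-- # name's substrings of the relevant lengths and hash-look each one up in a
-- # keyword->(priority, element) dict, keeping the hit of smallest priority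
-- # (= earliest position in A's branch/loop order).
-- _KEYWORDS = [
--     ('wands', 'fire'), ('cups', 'water'), ('swords', 'air'), ('pentacles', 'earth'),
--     ('emperor', 'fire'), ('strength', 'fire'), ('wheel', 'fire'), ('tower', 'fire'),
--     ('sun', 'fire'), ('judgement', 'fire'),
--     ('high priestess', 'water'), ('empress', 'water'), ('chariot', 'water'),
--     ('hanged', 'water'), ('death', 'water'), ('moon', 'water'), ('star', 'water'),
--     ('fool', 'air'), ('magician', 'air'), ('lovers', 'air'), ('justice', 'air'),
--     ('temperance', 'air'), ('world', 'air'),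
--     ('hierophant', 'earth'), ('hermit', 'earth'), ('devil', 'earth'),
-- ]
-- _TABLE = {kw: (prio, elem) for prio, (kw, elem) in enumerate(_KEYWORDS)}
-- _LENGTHS = sorted({len(kw) for kw, _ in _KEYWORDS})
--
--
-- def get_card_element(card_name):
--     """Determine the elemental association of a card."""
--     name = card_name.lower()
--     n = len(name)
--     best = None
--     for length in _LENGTHS:
--         for i in range(n - length + 1):
--             hit = _TABLE.get(name[i:i + length])
--             if hit is not None and (best is None or hit[0] < best[0]):
--                 best = hit
--     return best[1] if best is not None else 'spirit'
-- ===== Notes on version B (the rewrite author's own statement) =====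
-- stated objective: alternative
-- what changed: Instead of testing each keyword for substring containment in A's branch/loop order, B enumerates the lowercased name's substrings of the keyword lengths, hash-looks each up in a keyword->(priority, element) dict, and returns the element of the smallest-priority hit (priority = A's match order), with A's default when nothing matches.
import Mathlib
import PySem

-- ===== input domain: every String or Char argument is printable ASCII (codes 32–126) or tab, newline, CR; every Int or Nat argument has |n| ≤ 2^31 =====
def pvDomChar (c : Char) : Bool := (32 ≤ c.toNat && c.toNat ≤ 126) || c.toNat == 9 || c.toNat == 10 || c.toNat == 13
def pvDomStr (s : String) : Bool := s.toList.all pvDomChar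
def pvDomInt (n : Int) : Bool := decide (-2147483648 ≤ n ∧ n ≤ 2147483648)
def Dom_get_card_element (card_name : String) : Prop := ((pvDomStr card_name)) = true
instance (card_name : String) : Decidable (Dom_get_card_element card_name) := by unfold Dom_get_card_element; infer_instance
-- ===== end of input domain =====

-- B replaces A's per-keyword substring tests with the opposite traversal: it enumerates the
-- name's substrings of the keyword lengths, looks each up in a keyword -> (priority, element)
-- dict, and keeps the hit of smallest priority (= A's match order); same asymptotic cost.

-- ===== PORT A =====
-- Port of A's per-group loop: return true on the first keyword hit.
def pvLoopHit (majors : List String) (nameLower : String) : Bool :=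
  match majors with
  | [] => false
  | m :: rest => if PySem.Str.isIn m nameLower then true else pvLoopHit rest nameLower

def get_card_element (card_name : String) : String :=
  let name_lower := PySem.Str.lower card_name
  if PySem.Str.isIn "wands" name_lower then "fire"
  else if PySem.Str.isIn "cups" name_lower then "water"
  else if PySem.Str.isIn "swords" name_lower then "air"
  else if PySem.Str.isIn "pentacles" name_lower then "earth"
  else
    let fire_majors := ["emperor", "strength", "wheel", "tower", "sun", "judgement"]
    let water_majors := ["high priestess", "empress", "chariot", "hanged", "death", "moon", "star"]
    let air_majors := ["fool", "magician", "lovers", "justice", "temperance", "world"]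
    let earth_majors := ["hierophant", "hermit", "devil"]
    if pvLoopHit fire_majors name_lower then "fire"
    else if pvLoopHit water_majors name_lower then "water"
    else if pvLoopHit air_majors name_lower then "air"
    else if pvLoopHit earth_majors name_lower then "earth"
    else "spirit"

-- ===== PORT B =====
def pvKeywords : List (String × String) :=
  [("wands", "fire"), ("cups", "water"), ("swords", "air"), ("pentacles", "earth"),
   ("emperor", "fire"), ("strength", "fire"), ("wheel", "fire"), ("tower", "fire"),
   ("sun", "fire"), ("judgement", "fire"),
   ("high priestess", "water"), ("empress", "water"), ("chariot", "water"),
   ("hanged", "water"), ("death", "water"), ("moon", "water"), ("star", "water"),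
   ("fool", "air"), ("magician", "air"), ("lovers", "air"), ("justice", "air"),
   ("temperance", "air"), ("world", "air"),
   ("hierophant", "earth"), ("hermit", "earth"), ("devil", "earth")]

-- _TABLE = {kw: (prio, elem) for prio, (kw, elem) in enumerate(_KEYWORDS)}
def pvTable : PySem.Dict String (Int × String) :=
  PySem.Dict.ofList ((PySem.List.enumerate pvKeywords).map (fun p => (p.2.1, (p.1, p.2.2))))

-- _LENGTHS = sorted({len(kw) for kw, _ in _KEYWORDS})
def pvLengths : List Int :=
  PySem.List.sorted (PySem.Set.ofList (pvKeywords.map (fun p => PySem.Str.len p.1))) (fun x => x) false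

def get_card_element_alt (card_name : String) : String :=
  let name := PySem.Str.lower card_name
  let n : Int := PySem.Str.len name
  let best :=
    pvLengths.foldl (fun best length =>
      (PySem.List.pyRange 0 (n - length + 1) 1).foldl (fun best i =>
        match pvTable.get? (PySem.Str.slice name (some i) (some (i + length))) with
        | some hit =>
          match best with
          | none => some hit
          | some b => if hit.1 < b.1 then some hit else some b
        | none => best) best) (none : Option (Int × String))
  match best with
  | some b => b.2
  | none => "spirit"

-- ===== PRECONDITION & SPEC =====
def Spec_get_card_element (card_name : String) (out : String) : Prop := out = get_card_element_alt card_name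
instance (card_name : String) (out : String) : Decidable (Spec_get_card_element card_name out) := by unfold Spec_get_card_element; infer_instance

-- ===== CLAIM (what is proved, stated in full; the proofs are below) =====
def Claim_equal_get_card_element : Prop := ∀ (card_name : String), Dom_get_card_element card_name → Spec_get_card_element card_name (get_card_element card_name)

-- ===== LEMMAS AND PROOFS =====

-- The dict's underlying association list (pvTable.items, proved equal below).
def pvEntries : List (String × (Int × String)) :=
  (PySem.List.enumerate pvKeywords).map (fun p => (p.2.1, (p.1, p.2.2)))

-- B's accumulator update for one dict hit.
def pvStep (best : Option (Int × String)) (hit : Int × String) : Option (Int × String) :=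
  match best with
  | none => some hit
  | some b => if hit.1 < b.1 then some hit else some b

-- One dict lookup of B.
def pvGet (nl : String) (length i : Int) : Option (Int × String) :=
  pvTable.get? (PySem.Str.slice nl (some i) (some (i + length)))

-- All hits B's nested loops feed to pvStep, in visit order.
def pvHits (nl : String) : List (Int × String) :=
  pvLengths.flatMap (fun length =>
    (PySem.List.pyRange 0 (PySem.Str.len nl - length + 1) 1).filterMap (pvGet nl length))

theorem pv_items : pvTable.items = pvEntries := by decide
theorem pv_nodup_keys : pvTable.keys.Nodup := by decide
theorem pv_len_mem : ∀ p ∈ pvEntries, PySem.Str.len p.1 ∈ pvLengths := by decide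
theorem pv_len_pos : ∀ L ∈ pvLengths, 0 < L := by decide
theorem pv_pairwise : pvEntries.Pairwise (fun a b => a.2.1 < b.2.1) := by decide

-- inner loop = fold of pvStep over the hits of that length
theorem pv_fold_inner (g : Int → Option (Int × String)) (l : List Int) (b : Option (Int × String)) :
    l.foldl (fun best i =>
      match g i with
      | some hit => pvStep best hit
      | none => best) b
    = (l.filterMap g).foldl pvStep b := by
  induction l generalizing b with
  | nil => rfl
  | cons hd t ih =>
    simp only [List.foldl_cons, List.filterMap_cons]
    cases hg : g hd <;> simp [ih]

theorem pv_fold_flat (ls : List Int) (F : Int → List (Int × String)) (b : Option (Int × String)) :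
    ls.foldl (fun b L => (F L).foldl pvStep b) b = (ls.flatMap F).foldl pvStep b := by
  induction ls generalizing b with
  | nil => rfl
  | cons hd t ih => simp [List.flatMap_cons, List.foldl_append, ih]

theorem pv_alt_eq (c : String) :
    get_card_element_alt c
    = (match (pvHits (PySem.Str.lower c)).foldl pvStep none with
       | some b => b.2
       | none => "spirit") := by
  simp only [get_card_element_alt, pvHits]
  have h1 : ∀ (L : Int) (b : Option (Int × String)),
      (PySem.List.pyRange 0 (PySem.Str.len (PySem.Str.lower c) - L + 1) 1).foldl
        (fun best i =>
          match pvTable.get? (PySem.Str.slice (PySem.Str.lower c) (some i) (some (i + L))) with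
          | some hit =>
            match best with
            | none => some hit
            | some b => if hit.1 < b.1 then some hit else some b
          | none => best) b
      = ((PySem.List.pyRange 0 (PySem.Str.len (PySem.Str.lower c) - L + 1) 1).filterMap
          (pvGet (PySem.Str.lower c) L)).foldl pvStep b := by
    intro L b
    rw [← pv_fold_inner]
    rfl
  have h2 : (fun (best : Option (Int × String)) (length : Int) =>
      (PySem.List.pyRange 0 (PySem.Str.len (PySem.Str.lower c) - length + 1) 1).foldl
        (fun best i =>
          match pvTable.get? (PySem.Str.slice (PySem.Str.lower c) (some i) (some (i + length))) with
          | some hit =>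
            match best with
            | none => some hit
            | some b => if hit.1 < b.1 then some hit else some b
          | none => best) best)
      = (fun (b : Option (Int × String)) (L : Int) =>
          ((PySem.List.pyRange 0 (PySem.Str.len (PySem.Str.lower c) - L + 1) 1).filterMap
            (pvGet (PySem.Str.lower c) L)).foldl pvStep b) := by
    funext b L
    exact h1 L b
  rw [h2, pv_fold_flat]

theorem pv_fold_some (l : List (Int × String)) (b : Int × String) :
    ∀ m, l.foldl pvStep (some b) = some m →
      (m = b ∨ m ∈ l) ∧ m.1 ≤ b.1 ∧ ∀ x ∈ l, m.1 ≤ x.1 := by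
  induction l generalizing b with
  | nil =>
    intro m h
    simp only [List.foldl_nil, Option.some.injEq] at h
    subst h
    exact ⟨Or.inl rfl, le_refl _, by simp⟩
  | cons hd t ih =>
    intro m h
    simp only [List.foldl_cons, pvStep] at h
    by_cases hlt : hd.1 < b.1
    · rw [if_pos hlt] at h
      obtain ⟨hm, hle, hall⟩ := ih hd m h
      refine ⟨?_, by omega, ?_⟩
      · rcases hm with hm | hm
        · exact Or.inr (hm ▸ List.mem_cons_self)
        · exact Or.inr (List.mem_cons_of_mem _ hm)
      · intro x hx
        rcases List.mem_cons.mp hx with hx | hx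
        · subst hx; exact hle
        · exact hall x hx
    · rw [if_neg hlt] at h
      obtain ⟨hm, hle, hall⟩ := ih b m h
      refine ⟨?_, hle, ?_⟩
      · rcases hm with hm | hm
        · exact Or.inl hm
        · exact Or.inr (List.mem_cons_of_mem _ hm)
      · intro x hx
        rcases List.mem_cons.mp hx with hx | hx
        · subst hx; omega
        · exact hall x hx

theorem pv_fold_isSome (l : List (Int × String)) (b : Int × String) :
    (l.foldl pvStep (some b)).isSome := by
  induction l generalizing b with
  | nil => rfl
  | cons hd t ih =>
    simp only [List.foldl_cons, pvStep]
    split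
    · exact ih hd
    · exact ih b

theorem pv_fold_min (l : List (Int × String)) (m : Int × String)
    (h : l.foldl pvStep none = some m) : m ∈ l ∧ ∀ x ∈ l, m.1 ≤ x.1 := by
  cases l with
  | nil => simp at h
  | cons hd t =>
    simp only [List.foldl_cons, pvStep] at h
    obtain ⟨hm, hle, hall⟩ := pv_fold_some t hd m h
    refine ⟨?_, ?_⟩
    · rcases hm with hm | hm
      · exact hm ▸ List.mem_cons_self
      · exact List.mem_cons_of_mem _ hm
    · intro x hx
      rcases List.mem_cons.mp hx with hx | hx
      · subst hx; exact hle
      · exact hall x hx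

theorem pv_fold_ne_none (l : List (Int × String)) (x : Int × String) (hx : x ∈ l) :
    l.foldl pvStep none ≠ none := by
  cases l with
  | nil => simp at hx
  | cons hd t =>
    simp only [List.foldl_cons, pvStep]
    intro h
    have := pv_fold_isSome t hd
    rw [h] at this
    simp at this

-- membership in pvHits characterised by the keyword table
theorem pv_hits_sound (nl : String) (x : Int × String) (hx : x ∈ pvHits nl) :
    ∃ s, (s, x) ∈ pvEntries ∧ PySem.Str.isIn s nl = true := by
  simp only [pvHits, List.mem_flatMap, List.mem_filterMap] at hx
  obtain ⟨L, hL, i, hi, hg⟩ := hx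
  rw [PySem.List.mem_pyRange_one] at hi
  have hLpos : 0 < L := pv_len_pos L hL
  simp only [pvGet] at hg
  have hmem := (PySem.Dict.get?_eq_some_iff_mem_items pvTable _ x pv_nodup_keys).mp hg
  rw [pv_items] at hmem
  refine ⟨_, hmem, ?_⟩
  rw [PySem.Str.isIn_eq]
  rw [(PySem.Chars.isIn_iff_infix _ _)]
  rw [PySem.Str.toList_slice, PySem.Chars.slice_eq_listSlice]
  rw [PySem.List.slice_toNat nl.toList (by omega) (by omega)]
  exact (List.take_prefix _ _).isInfix.trans (nl.toList.drop_suffix _).isInfix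

theorem pv_hits_complete (nl : String) (s : String) (x : Int × String)
    (he : (s, x) ∈ pvEntries) (hin : PySem.Str.isIn s nl = true) : x ∈ pvHits nl := by
  have hL : PySem.Str.len s ∈ pvLengths := pv_len_mem (s, x) he
  have hLpos : 0 < PySem.Str.len s := pv_len_pos _ hL
  have hlen : PySem.Str.len s = (s.toList.length : Int) := by simp
  rw [PySem.Str.isIn_eq] at hin
  obtain ⟨j, hpre⟩ := (PySem.Chars.exists_prefix_drop_iff_isIn s.toList nl.toList).mpr hin
  have hjlen : s.toList.length ≤ nl.toList.length - j := by
    have := hpre.length_le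
    simpa using this
  have hslen : 0 < s.toList.length := by omega
  have hjn : j + s.toList.length ≤ nl.toList.length := by omega
  simp only [pvHits, List.mem_flatMap, List.mem_filterMap]
  refine ⟨PySem.Str.len s, hL, (j : Int), ?_, ?_⟩
  · rw [PySem.List.mem_pyRange_one]
    constructor
    · exact_mod_cast Int.natCast_nonneg j
    · have hnl : PySem.Str.len nl = (nl.toList.length : Int) := by simp
      rw [hnl, hlen]
      omega
  · simp only [pvGet]
    have hseq : PySem.Str.slice nl (some (j : Int)) (some ((j : Int) + PySem.Str.len s)) = s := by
      apply String.toList_inj.mp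
      rw [PySem.Str.toList_slice, PySem.Chars.slice_eq_listSlice]
      rw [PySem.List.slice_toNat nl.toList (by omega) (by omega)]
      have harith : ((j : Int) + PySem.Str.len s).toNat - ((j : Int)).toNat = s.toList.length := by
        rw [hlen]; omega
      rw [harith]
      exact (List.prefix_iff_eq_take.mp hpre).symm
    rw [hseq]
    exact (PySem.Dict.get?_eq_some_iff_mem_items pvTable _ x pv_nodup_keys).mpr (pv_items ▸ he)

-- A as a first-match over the keyword list: each branch/group of A is one block of pvKeywords
theorem pv_group_step (l : List String) (e : String) (rest : List (String × String)) (nl : String) :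
    (match ((l.map (fun k => (k, e))) ++ rest).find? (fun p => PySem.Str.isIn p.1 nl) with
     | some p => p.2
     | none => "spirit")
    = if pvLoopHit l nl then e
      else (match rest.find? (fun p => PySem.Str.isIn p.1 nl) with
            | some p => p.2
            | none => "spirit") := by
  induction l with
  | nil => simp [pvLoopHit]
  | cons k t ih =>
    by_cases h : PySem.Str.isIn k nl = true
    · simp only [pysem] at h
      have hb : PySem.Chars.isIn k.toList nl.toList = true :=
        (PySem.Chars.isIn_iff_infix _ _).mpr h
      simp [pvLoopHit, hb]
    · rw [Bool.not_eq_true] at h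
      simp only [pysem] at h
      have hb : PySem.Chars.isIn k.toList nl.toList = false :=
        (PySem.Chars.isIn_eq_false_iff _ _).mpr h
      simp [pvLoopHit, hb] at ih ⊢
      exact ih

theorem pv_single_hit (k : String) (nl : String) :
    pvLoopHit [k] nl = PySem.Str.isIn k nl := by
  simp [pvLoopHit]

theorem pv_A_eq (c : String) :
    get_card_element c
    = (match pvKeywords.find? (fun p => PySem.Str.isIn p.1 (PySem.Str.lower c)) with
       | some p => p.2
       | none => "spirit") := by
  have htab : pvKeywords =
      (["wands"].map (fun k => (k, "fire"))) ++
      ((["cups"].map (fun k => (k, "water"))) ++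
      ((["swords"].map (fun k => (k, "air"))) ++
      ((["pentacles"].map (fun k => (k, "earth"))) ++
      ((["emperor", "strength", "wheel", "tower", "sun", "judgement"].map (fun k => (k, "fire"))) ++
      ((["high priestess", "empress", "chariot", "hanged", "death", "moon", "star"].map (fun k => (k, "water"))) ++
      ((["fool", "magician", "lovers", "justice", "temperance", "world"].map (fun k => (k, "air"))) ++
      ((["hierophant", "hermit", "devil"].map (fun k => (k, "earth"))) ++ ([] : List (String × String))))))))) := by
    rfl
  rw [htab]
  rw [pv_group_step, pv_group_step, pv_group_step, pv_group_step,
      pv_group_step, pv_group_step, pv_group_step, pv_group_step]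
  simp only [get_card_element, pv_single_hit, List.find?_nil]

-- find? over pvKeywords matches head-of-filter over the enumerated entries
theorem pv_gen (pred : String → Bool) (l : List (String × String)) : ∀ (s : Int),
    Option.map (fun (e : String × (Int × String)) => (e.1, e.2.2))
      ((((PySem.List.enumerate l s).map (fun p => (p.2.1, (p.1, p.2.2)))).filter (fun e => pred e.1)).head?)
    = l.find? (fun p => pred p.1) := by
  induction l with
  | nil => intro s; simp [pysem]
  | cons hd t ih =>
    intro s
    have hc : PySem.List.enumerate (hd :: t) s = (s, hd) :: PySem.List.enumerate t (s + 1) := by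
      simp [pysem]
    rw [hc]
    simp only [List.map_cons, List.filter_cons, List.find?_cons]
    by_cases hp : pred hd.1
    · simp [hp]
    · simpa [hp] using ih (s + 1)

theorem pv_main (c : String) : get_card_element c = get_card_element_alt c := by
  rw [pv_A_eq, pv_alt_eq]
  have hgen := pv_gen (fun s => PySem.Str.isIn s (PySem.Str.lower c)) pvKeywords 0
  cases hm : ((pvEntries.filter (fun e => PySem.Str.isIn e.1 (PySem.Str.lower c))).head?) with
  | none =>
    have hfe : pvEntries.filter (fun e => PySem.Str.isIn e.1 (PySem.Str.lower c)) = [] :=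
      List.head?_eq_none_iff.mp hm
    have hfind : pvKeywords.find? (fun p => PySem.Str.isIn p.1 (PySem.Str.lower c)) = none := by
      rw [← hgen]
      rw [show (PySem.List.enumerate pvKeywords 0).map (fun p => (p.2.1, (p.1, p.2.2))) = pvEntries from rfl]
      rw [hm]
      rfl
    have hnil : pvHits (PySem.Str.lower c) = [] := by
      rw [List.eq_nil_iff_forall_not_mem]
      intro x hx
      obtain ⟨s, he, hin⟩ := pv_hits_sound _ x hx
      have : (s, x) ∈ pvEntries.filter (fun e => PySem.Str.isIn e.1 (PySem.Str.lower c)) :=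
        List.mem_filter.mpr ⟨he, hin⟩
      rw [hfe] at this
      simp at this
    rw [hfind, hnil]
    rfl
  | some e =>
    have hfind : pvKeywords.find? (fun p => PySem.Str.isIn p.1 (PySem.Str.lower c)) = some (e.1, e.2.2) := by
      rw [← hgen]
      rw [show (PySem.List.enumerate pvKeywords 0).map (fun p => (p.2.1, (p.1, p.2.2))) = pvEntries from rfl]
      rw [hm]
      rfl
    have hemem : e ∈ pvEntries.filter (fun e => PySem.Str.isIn e.1 (PySem.Str.lower c)) :=
      List.mem_of_mem_head? (by rw [hm]; exact Option.mem_some_iff.mpr rfl)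
    have he : e ∈ pvEntries := (List.mem_filter.mp hemem).1
    have hine : PySem.Str.isIn e.1 (PySem.Str.lower c) = true := by
      have := (List.mem_filter.mp hemem).2
      simpa using this
    have hxmem : e.2 ∈ pvHits (PySem.Str.lower c) :=
      pv_hits_complete _ e.1 e.2 (by simpa using he) hine
    cases hfold : (pvHits (PySem.Str.lower c)).foldl pvStep none with
    | none => exact absurd hfold (pv_fold_ne_none _ _ hxmem)
    | some m =>
      obtain ⟨hmmem, hmin⟩ := pv_fold_min _ _ hfold
      obtain ⟨t, hte, htin⟩ := pv_hits_sound _ m hmmem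
      have htf : (t, m) ∈ pvEntries.filter (fun e => PySem.Str.isIn e.1 (PySem.Str.lower c)) :=
        List.mem_filter.mpr ⟨hte, htin⟩
      have hpw : (pvEntries.filter (fun e => PySem.Str.isIn e.1 (PySem.Str.lower c))).Pairwise
          (fun a b => a.2.1 < b.2.1) :=
        pv_pairwise.sublist List.filter_sublist
      have hme : m = e.2 := by
        cases hfl : (pvEntries.filter (fun e => PySem.Str.isIn e.1 (PySem.Str.lower c))) with
        | nil => rw [hfl] at hm; simp at hm
        | cons f rest =>
          rw [hfl] at hm htf hpw
          have hfe : f = e := by simpa using hm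
          subst hfe
          rcases List.mem_cons.mp htf with h | h
          · exact congrArg Prod.snd h
          · have hlt : f.2.1 < m.1 := (List.pairwise_cons.mp hpw).1 _ h
            have hle : m.1 ≤ f.2.1 := hmin f.2 hxmem
            omega
      rw [hfind]
      simp [hme]

-- ===== VERDICT (by name: the statement is the Claim_ definition above) =====
theorem get_card_element_spec : Claim_equal_get_card_element := by
  intro c _
  exact pv_main c
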